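-- pv_equiv track=rewrite | github.com/buyuan/Forstudy_Python_Leetcode | T325.py | maxSubArrayLen_old
-- ===== SOURCE A (Python) =====
-- def maxSubArrayLen_old(nums: list[int], k: int) -> int:
--     ans = 0
--     temp = k
--     for i in range(0, len(nums)):
--         temp = temp-nums[i]
--         if temp == 0:
--             ans =max(ans,1 )
--         for j in range(i+1, len(nums)):
--             temp = temp - nums[j]
--             if temp == 0:
--                 ans = max(j-i+1, ans)
--                 #temp = k
--         temp = k
--     return ans
-- ===== SOURCE B (Python) =====
-- def maxSubArrayLen_old(nums: list[int], k: int) -> int: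
--     # One pass with prefix sums: remember the earliest index of each prefix sum.
--     first = {0: -1}
--     s = 0
--     ans = 0
--     for i, x in enumerate(nums):
--         s += x
--         if s - k in first:
--             ans = max(ans, i - first[s - k])
--         if s not in first:
--             first[s] = i
--     return ans
-- ===== Notes on version B (the rewrite author's own statement) =====
-- stated objective: faster
-- what changed: Replaced the quadratic scan over all start/end index pairs by a single pass over prefix sums that stores the earliest index of each prefix sum in a hash map.
import Mathlib
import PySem

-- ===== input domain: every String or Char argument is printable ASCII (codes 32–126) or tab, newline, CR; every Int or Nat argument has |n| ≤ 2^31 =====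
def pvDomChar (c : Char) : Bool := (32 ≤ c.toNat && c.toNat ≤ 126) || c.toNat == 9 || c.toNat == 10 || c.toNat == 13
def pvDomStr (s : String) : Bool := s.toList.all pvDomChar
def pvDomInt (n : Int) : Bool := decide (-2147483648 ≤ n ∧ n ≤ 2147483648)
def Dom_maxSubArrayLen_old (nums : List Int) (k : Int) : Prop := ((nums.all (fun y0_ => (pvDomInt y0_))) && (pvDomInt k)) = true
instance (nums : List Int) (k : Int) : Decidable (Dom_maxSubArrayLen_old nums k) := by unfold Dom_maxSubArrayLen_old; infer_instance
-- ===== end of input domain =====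

-- B replaces A's quadratic scan over all start/end pairs by a single prefix-sum pass
-- with a map holding the earliest index of each prefix sum (measured asymptotically faster).


-- ===== PORT A =====
def maxSubArrayLen_old (nums : List Int) (k : Int) : Int :=
  let st := (PySem.List.pyRange 0 (nums.length : Int) 1).foldl
    (fun (st : Int × Int) i =>
      let temp := st.2 - PySem.List.pyGetD nums i 0
      let ans := if temp = 0 then max st.1 1 else st.1
      let st2 := (PySem.List.pyRange (i + 1) (nums.length : Int) 1).foldl
        (fun (st : Int × Int) j =>
          let temp := st.2 - PySem.List.pyGetD nums j 0
          let ans := if temp = 0 then max (j - i + 1) st.1 else st.1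
          (ans, temp)) (ans, temp)
      (st2.1, k)) ((0 : Int), k)
  st.1

-- ===== PORT B =====
def maxSubArrayLen_old_alt (nums : List Int) (k : Int) : Int :=
  let st := (PySem.List.enumerate nums 0).foldl
    (fun (st : PySem.Dict Int Int × Int × Int) p =>
      let s := st.2.1 + p.2
      let ans := match st.1.get? (s - k) with
        | some t => max st.2.2 (p.1 - t)
        | none => st.2.2
      let first := if st.1.contains s then st.1 else st.1.insert s p.1
      (first, s, ans))
    (PySem.Dict.ofList [((0 : Int), (-1 : Int))], (0 : Int), (0 : Int))
  st.2.2

-- ===== PRECONDITION & SPEC =====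
def Spec_maxSubArrayLen_old (nums : List Int) (k : Int) (out : Int) : Prop := out = maxSubArrayLen_old_alt nums k
instance (nums : List Int) (k : Int) (out : Int) : Decidable (Spec_maxSubArrayLen_old nums k out) := by unfold Spec_maxSubArrayLen_old; infer_instance

-- ===== CLAIM (what is proved, stated in full; the proofs are below) =====
def Claim_equal_maxSubArrayLen_old : Prop := ∀ (nums : List Int) (k : Int), Dom_maxSubArrayLen_old nums k → Spec_maxSubArrayLen_old nums k (maxSubArrayLen_old nums k)

-- ===== LEMMAS AND PROOFS =====

-- prefix sum of the first p elements
def pref (nums : List Int) (p : Nat) : Int := (nums.take p).sum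

-- a value is attained by some subarray summing to k (or is 0)
def Attained (nums : List Int) (k a : Int) : Prop :=
  a = 0 ∨ ∃ p q : Nat, p < q ∧ q ≤ nums.length ∧ pref nums q - pref nums p = k ∧ a = (q : Int) - p

-- a bounds every subarray-summing-to-k length with start < t
def BoundStart (nums : List Int) (k : Int) (t : Nat) (a : Int) : Prop :=
  ∀ p q : Nat, p < t → p < q → q ≤ nums.length → pref nums q - pref nums p = k → (q : Int) - p ≤ a

-- a bounds every subarray-summing-to-k length with end ≤ t
def BoundEnd (nums : List Int) (k : Int) (t : Nat) (a : Int) : Prop :=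
  ∀ p q : Nat, p < q → q ≤ t → pref nums q - pref nums p = k → (q : Int) - p ≤ a

-- the inner loop of A, as structural recursion over the remaining suffix
def innerRef (i : Int) : List Int → Int → Int → Int → Int
  | [], _, ans, _ => ans
  | x :: xs, j, ans, temp =>
      let t := temp - x
      innerRef i xs (j + 1) (if t = 0 then max (j - i + 1) ans else ans) t

-- the outer loop of A
def aRef (nums : List Int) (k : Int) : List Int → Nat → Int → Int
  | [], _, ans => ans
  | _ :: rest, i, ans => aRef nums k rest (i + 1) (innerRef (i : Int) (nums.drop i) (i : Int) ans k)

-- earliest p ≤ t with pref nums p = v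
def firstIdx (nums : List Int) (v : Int) : Nat → Option Nat
  | 0 => if pref nums 0 = v then some 0 else none
  | t + 1 =>
      match firstIdx nums v t with
      | some p => some p
      | none => if pref nums (t + 1) = v then some (t + 1) else none


-- basic prefix-sum facts
lemma pref_zero (nums : List Int) : pref nums 0 = 0 := rfl

lemma sum_take_drop (nums : List Int) (i m : Nat) :
    ((nums.drop i).take m).sum = pref nums (i + m) - pref nums i := by
  have h : nums.take (i + m) = nums.take i ++ (nums.drop i).take m := List.take_add ..
  simp only [pref]
  rw [h, List.sum_append]
  ring

lemma pref_succ (nums : List Int) (t : Nat) (h : t < nums.length) :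
    pref nums (t + 1) = pref nums t + nums[t] := by
  have h1 := sum_take_drop nums t 1
  rw [List.drop_eq_getElem_cons h] at h1
  simp only [List.take_succ_cons, List.take_zero, List.sum_cons, List.sum_nil, add_zero] at h1
  linarith

-- characterisation of A's inner loop
lemma innerRef_spec (i : Int) : ∀ (l : List Int) (j ans temp : Int),
    ans ≤ innerRef i l j ans temp ∧
    (innerRef i l j ans temp = ans ∨ ∃ m : Nat, m < l.length ∧
        temp - (l.take (m + 1)).sum = 0 ∧ innerRef i l j ans temp = j + m - i + 1) ∧
    (∀ m : Nat, m < l.length → temp - (l.take (m + 1)).sum = 0 →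
        j + (m : Int) - i + 1 ≤ innerRef i l j ans temp) := by
  intro l
  induction l with
  | nil =>
    intro j ans temp
    refine ⟨le_refl _, Or.inl rfl, ?_⟩
    intro m hm
    simp at hm
  | cons x xs ih =>
    intro j ans temp
    simp only [innerRef]
    set t := temp - x with ht
    set ans' := (if t = 0 then max (j - i + 1) ans else ans) with hans'
    obtain ⟨h1, h2, h3⟩ := ih (j + 1) ans' t
    have hle : ans ≤ ans' := by
      by_cases h : t = 0 <;> simp [hans', h]
    refine ⟨le_trans hle h1, ?_, ?_⟩
    · rcases h2 with h2 | ⟨m, hm, hsum, heq⟩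
      · by_cases h : t = 0
        · rcases max_choice (j - i + 1) ans with hmc | hmc
          · right
            refine ⟨0, by simp, by simpa [ht] using h, ?_⟩
            rw [h2, hans', if_pos h, hmc]
            push_cast; ring
          · left; rw [h2, hans', if_pos h, hmc]
        · left; rw [h2, hans', if_neg h]
      · right
        refine ⟨m + 1, by simpa using hm, ?_, ?_⟩
        · have : t - (xs.take (m + 1)).sum = 0 := hsum
          rw [List.take_succ_cons, List.sum_cons]
          rw [ht] at this
          linarith
        · rw [heq]; push_cast; ring
    · intro m hm hsum
      match m with
      | 0 =>
        have h0 : t = 0 := by simpa [ht] using hsum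
        have hub : j - i + 1 ≤ ans' := by simp [hans', h0]
        calc j + ((0 : Nat) : Int) - i + 1 = j - i + 1 := by push_cast; ring
        _ ≤ ans' := hub
        _ ≤ _ := h1
      | Nat.succ m' =>
        have hsum' : t - (xs.take (m' + 1)).sum = 0 := by
          rw [List.take_succ_cons, List.sum_cons] at hsum
          rw [ht]
          linarith
        have := h3 m' (by simpa using hm) hsum'
        calc j + ((m' + 1 : Nat) : Int) - i + 1 = (j + 1) + (m' : Int) - i + 1 := by push_cast; ring
        _ ≤ _ := this

-- A's port inner fold is innerRef
lemma inner_eq (nums : List Int) (i : Int) :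
    ∀ (l : List Int) (aN : Nat) (ans temp : Int), l = nums.drop aN →
    (PySem.List.pyRange (aN : Int) (nums.length : Int) 1).foldl
      (fun (st : Int × Int) j =>
        let temp := st.2 - PySem.List.pyGetD nums j 0
        let ans := if temp = 0 then max (j - i + 1) st.1 else st.1
        (ans, temp)) (ans, temp)
    = (innerRef i l (aN : Int) ans temp, temp - l.sum) := by
  intro l
  induction l with
  | nil =>
    intro aN ans temp h
    have hlen : nums.length ≤ aN := List.drop_eq_nil_iff.mp h.symm
    rw [PySem.List.pyRange_one_eq_nil (by exact_mod_cast hlen)]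
    simp [innerRef]
  | cons x xs ih =>
    intro aN ans temp h
    have hlt : aN < nums.length := by
      by_contra hc
      rw [List.drop_eq_nil_iff.mpr (by omega)] at h
      simp at h
    have hget : PySem.List.pyGetD nums (aN : Int) 0 = x := by
      have h0 : nums[aN + 0]? = some x := by
        rw [← List.getElem?_drop, ← h]
        rfl
      simp only [PySem.List.pyGetD_natCast, List.getD_eq_getElem?_getD]
      simp at h0
      simp [h0]
    have hxs : xs = nums.drop (aN + 1) := by
      have := congrArg (List.drop 1) h
      rw [List.drop_drop] at this
      simpa using this
    rw [PySem.List.pyRange_one_cons (by exact_mod_cast hlt)]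
    simp only [List.foldl_cons, hget]
    have hcast : (aN : Int) + 1 = ((aN + 1 : Nat) : Int) := by push_cast; ring
    rw [hcast, ih (aN + 1) _ _ hxs]
    simp only [innerRef, List.sum_cons]
    rw [hcast]
    congr 1
    ring

-- A's port outer fold is aRef
lemma outer_eq (nums : List Int) (k : Int) :
    ∀ (l : List Int) (iN : Nat) (ans : Int), l = nums.drop iN →
    (PySem.List.pyRange (iN : Int) (nums.length : Int) 1).foldl
      (fun (st : Int × Int) i =>
        let temp := st.2 - PySem.List.pyGetD nums i 0
        let ans := if temp = 0 then max st.1 1 else st.1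
        let st2 := (PySem.List.pyRange (i + 1) (nums.length : Int) 1).foldl
          (fun (st : Int × Int) j =>
            let temp := st.2 - PySem.List.pyGetD nums j 0
            let ans := if temp = 0 then max (j - i + 1) st.1 else st.1
            (ans, temp)) (ans, temp)
        (st2.1, k)) (ans, k)
    = (aRef nums k l iN ans, k) := by
  intro l
  induction l with
  | nil =>
    intro iN ans h
    have hlen : nums.length ≤ iN := List.drop_eq_nil_iff.mp h.symm
    rw [PySem.List.pyRange_one_eq_nil (by exact_mod_cast hlen)]
    simp [aRef]
  | cons x xs ih =>
    intro iN ans h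
    have hlt : iN < nums.length := by
      by_contra hc
      rw [List.drop_eq_nil_iff.mpr (by omega)] at h
      simp at h
    have hget : PySem.List.pyGetD nums (iN : Int) 0 = x := by
      have h0 : nums[iN + 0]? = some x := by
        rw [← List.getElem?_drop, ← h]
        rfl
      simp only [PySem.List.pyGetD_natCast, List.getD_eq_getElem?_getD]
      simp at h0
      simp [h0]
    have hxs : xs = nums.drop (iN + 1) := by
      have := congrArg (List.drop 1) h
      rw [List.drop_drop] at this
      simpa using this
    rw [PySem.List.pyRange_one_cons (by exact_mod_cast hlt)]
    simp only [List.foldl_cons, hget]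
    have hcast : (iN : Int) + 1 = ((iN + 1 : Nat) : Int) := by push_cast; ring
    rw [hcast, inner_eq nums (iN : Int) (nums.drop (iN + 1)) (iN + 1) _ _ rfl]
    rw [ih (iN + 1) _ hxs]
    congr 1
    simp only [aRef]
    rw [← h, ← hxs]
    simp only [innerRef]
    rw [hcast]
    have hA : (if k - x = 0 then max ans 1 else ans)
        = (if k - x = 0 then max ((iN : Int) - (iN : Int) + 1) ans else ans) := by
      have h1 : ((iN : Int) - (iN : Int) + 1 : Int) = 1 := by ring
      rw [h1]
      split_ifs with hx
      · exact max_comm ans 1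
      · rfl
    rw [hA]

lemma a_eq_aRef (nums : List Int) (k : Int) :
    maxSubArrayLen_old nums k = aRef nums k nums 0 0 := by
  unfold maxSubArrayLen_old
  have h := outer_eq nums k nums 0 0 rfl
  simp only [Nat.cast_zero] at h
  rw [h]

-- characterisation of aRef
lemma aRef_spec (nums : List Int) (k : Int) :
    ∀ (l : List Int) (iN : Nat) (ans : Int), l = nums.drop iN →
    0 ≤ ans → Attained nums k ans → BoundStart nums k iN ans →
    0 ≤ aRef nums k l iN ans ∧ Attained nums k (aRef nums k l iN ans) ∧
      BoundStart nums k nums.length (aRef nums k l iN ans) := by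
  intro l
  induction l with
  | nil =>
    intro iN ans h h0 hA hB
    have hlen : nums.length ≤ iN := List.drop_eq_nil_iff.mp h.symm
    simp only [aRef]
    exact ⟨h0, hA, fun p q hp hpq hq hk => hB p q (by omega) hpq hq hk⟩
  | cons x xs ih =>
    intro iN ans h h0 hA hB
    have hlt : iN < nums.length := by
      by_contra hc
      rw [List.drop_eq_nil_iff.mpr (by omega)] at h
      simp at h
    have hxs : xs = nums.drop (iN + 1) := by
      have := congrArg (List.drop 1) h
      rw [List.drop_drop] at this
      simpa using this
    obtain ⟨s1, s2, s3⟩ := innerRef_spec (iN : Int) (nums.drop iN) (iN : Int) ans k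
    have hlen : (nums.drop iN).length = nums.length - iN := List.length_drop ..
    have h0' : 0 ≤ innerRef (iN : Int) (nums.drop iN) (iN : Int) ans k := le_trans h0 s1
    have hA' : Attained nums k (innerRef (iN : Int) (nums.drop iN) (iN : Int) ans k) := by
      rcases s2 with he | ⟨m, hm, hsum, heq⟩
      · rw [he]; exact hA
      · right
        rw [hlen] at hm
        refine ⟨iN, iN + m + 1, by omega, by omega, ?_, ?_⟩
        · have hst := sum_take_drop nums iN (m + 1)
          have hq' : iN + (m + 1) = iN + m + 1 := by omega
          rw [hq'] at hst
          rw [hst] at hsum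
          linarith
        · rw [heq]; push_cast; ring
    have hB' : BoundStart nums k (iN + 1) (innerRef (iN : Int) (nums.drop iN) (iN : Int) ans k) := by
      intro p q hp hpq hq hk
      rcases (by omega : p < iN ∨ p = iN) with hp' | hp'
      · exact le_trans (hB p q hp' hpq hq hk) s1
      · subst hp'
        have hmlt : q - p - 1 < (nums.drop p).length := by rw [hlen]; omega
        have hsum : k - ((nums.drop p).take ((q - p - 1) + 1)).sum = 0 := by
          have hst := sum_take_drop nums p ((q - p - 1) + 1)
          have hq' : p + ((q - p - 1) + 1) = q := by omega
          rw [hq'] at hst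
          rw [hst, hk]
          ring
        have hres := s3 (q - p - 1) hmlt hsum
        have hcast : ((q : Int)) - p = (p : Int) + ((q - p - 1 : Nat) : Int) - p + 1 := by
          push_cast [Nat.cast_sub (by omega : 1 ≤ q - p), Nat.cast_sub (by omega : p ≤ q)]
          ring
        rw [hcast]
        exact hres
    simp only [aRef]
    exact ih (iN + 1) _ hxs h0' hA' hB'

-- firstIdx facts
lemma fi_sound (nums : List Int) (v : Int) :
    ∀ (t p : Nat), firstIdx nums v t = some p → p ≤ t ∧ pref nums p = v := by
  intro t
  induction t with
  | zero =>
    intro p h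
    simp only [firstIdx] at h
    split_ifs at h with hv
    · cases h; exact ⟨le_refl 0, hv⟩
  | succ t ih =>
    intro p h
    simp only [firstIdx] at h
    cases hft : firstIdx nums v t with
    | some p' =>
      rw [hft] at h
      cases h
      obtain ⟨h1, h2⟩ := ih _ hft
      exact ⟨by omega, h2⟩
    | none =>
      rw [hft] at h
      split_ifs at h with hv
      · cases h; exact ⟨le_refl _, hv⟩

lemma fi_none (nums : List Int) (v : Int) :
    ∀ (t : Nat), firstIdx nums v t = none → ∀ p ≤ t, pref nums p ≠ v := by
  intro t
  induction t with
  | zero =>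
    intro h p hp
    simp only [firstIdx] at h
    split_ifs at h with hv
    have : p = 0 := by omega
    rw [this]
    exact hv
  | succ t ih =>
    intro h p hp
    simp only [firstIdx] at h
    cases hft : firstIdx nums v t with
    | some p' => rw [hft] at h; simp at h
    | none =>
      rw [hft] at h
      split_ifs at h with hv
      rcases (by omega : p ≤ t ∨ p = t + 1) with hp' | hp'
      · exact ih hft p hp'
      · rw [hp']; exact hv

lemma fi_min (nums : List Int) (v : Int) :
    ∀ (t p : Nat), firstIdx nums v t = some p → ∀ p' ≤ t, pref nums p' = v → p ≤ p' := by
  intro t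
  induction t with
  | zero =>
    intro p h p' hp' hv
    simp only [firstIdx] at h
    split_ifs at h with hv0
    cases h
    omega
  | succ t ih =>
    intro p h p' hp' hv
    simp only [firstIdx] at h
    cases hft : firstIdx nums v t with
    | some p'' =>
      rw [hft] at h
      cases h
      rcases (by omega : p' ≤ t ∨ p' = t + 1) with hp'' | hp''
      · exact ih _ hft p' hp'' hv
      · have := (fi_sound nums v t _ hft).1
        omega
    | none =>
      rw [hft] at h
      split_ifs at h with hv1
      cases h
      rcases (by omega : p' ≤ t ∨ p' = t + 1) with hp'' | hp''
      · exact absurd hv (fi_none nums v t hft p' hp'')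
      · omega

-- B's loop step (definitionally the lambda in the port)
def bStep (k : Int) (st : PySem.Dict Int Int × Int × Int) (p : Int × Int) :
    PySem.Dict Int Int × Int × Int :=
  let s := st.2.1 + p.2
  let ans := match st.1.get? (s - k) with
    | some t => max st.2.2 (p.1 - t)
    | none => st.2.2
  let first := if st.1.contains s then st.1 else st.1.insert s p.1
  (first, s, ans)

lemma b_loop (nums : List Int) (k : Int) :
    ∀ (l : List Int) (tN : Nat) (d : PySem.Dict Int Int) (s ans : Int),
    l = nums.drop tN →
    s = pref nums tN →
    (∀ v : Int, d.get? v = (firstIdx nums v tN).map (fun p => (p : Int) - 1)) →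
    0 ≤ ans → Attained nums k ans → BoundEnd nums k tN ans →
    0 ≤ ((PySem.List.enumerate l (tN : Int)).foldl (bStep k) (d, s, ans)).2.2 ∧
    Attained nums k ((PySem.List.enumerate l (tN : Int)).foldl (bStep k) (d, s, ans)).2.2 ∧
    BoundEnd nums k nums.length ((PySem.List.enumerate l (tN : Int)).foldl (bStep k) (d, s, ans)).2.2 := by
  intro l
  induction l with
  | nil =>
    intro tN d s ans h hs hd h0 hA hB
    have hlen : nums.length ≤ tN := List.drop_eq_nil_iff.mp h.symm
    simp only [PySem.List.enumerate_nil, List.foldl_nil]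
    exact ⟨h0, hA, fun p q hpq hq hk => hB p q hpq (by omega) hk⟩
  | cons x xs ih =>
    intro tN d s ans h hs hd h0 hA hB
    have hlt : tN < nums.length := by
      by_contra hc
      rw [List.drop_eq_nil_iff.mpr (by omega)] at h
      simp at h
    have hx : nums[tN] = x := by
      have h0' : nums[tN + 0]? = some x := by
        rw [← List.getElem?_drop, ← h]
        rfl
      rw [Nat.add_zero, List.getElem?_eq_getElem hlt] at h0'
      exact Option.some.inj h0'
    have hxs : xs = nums.drop (tN + 1) := by
      have := congrArg (List.drop 1) h
      rw [List.drop_drop] at this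
      simpa using this
    have hsx : s + x = pref nums (tN + 1) := by
      rw [hs, pref_succ nums tN hlt, hx]
    have hcast : (tN : Int) + 1 = ((tN + 1 : Nat) : Int) := by push_cast; ring
    rw [PySem.List.enumerate_cons, List.foldl_cons]
    -- the updated dictionary always satisfies the invariant at tN + 1
    have hd' : ∀ v : Int,
        (if d.contains (pref nums (tN + 1)) then d else d.insert (pref nums (tN + 1)) (tN : Int)).get? v
          = (firstIdx nums v (tN + 1)).map (fun p => (p : Int) - 1) := by
      intro v
      cases hcon : d.contains (pref nums (tN + 1)) with
      | true =>
        simp only [if_true]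
        have hsome : (firstIdx nums (pref nums (tN + 1)) tN).isSome := by
          have h1 := PySem.Dict.contains_eq_isSome_get? (d := d) (k := pref nums (tN + 1))
          rw [hcon, hd] at h1
          rcases hft : firstIdx nums (pref nums (tN + 1)) tN with _ | p
          · rw [hft] at h1; simp at h1
          · rfl
        rw [hd]
        rcases hft : firstIdx nums v tN with _ | p
        · have hne : pref nums (tN + 1) ≠ v := by
            intro he
            rw [he] at hsome
            rw [hft] at hsome
            simp at hsome
          simp only [firstIdx, hft, if_neg hne]
        · simp only [firstIdx, hft]
      | false =>
        simp only [Bool.false_eq_true, if_false]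
        have hnone : firstIdx nums (pref nums (tN + 1)) tN = none := by
          have h1 := PySem.Dict.contains_eq_isSome_get? (d := d) (k := pref nums (tN + 1))
          rw [hcon, hd] at h1
          rcases hft : firstIdx nums (pref nums (tN + 1)) tN with _ | p
          · rfl
          · rw [hft] at h1; simp at h1
        by_cases hveq : v = pref nums (tN + 1)
        · subst hveq
          rw [PySem.Dict.get?_insert_self]
          simp only [firstIdx, hnone]
          have htt : ((tN : Int)) = ((tN + 1 : Nat) : Int) - 1 := by push_cast; ring
          rw [htt]
          rfl
        · rw [PySem.Dict.get?_insert_of_ne _ _ hveq, hd]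
          rcases hft : firstIdx nums v tN with _ | p
          · have hne : pref nums (tN + 1) ≠ v := fun he => hveq he.symm
            simp only [firstIdx, hft, if_neg hne]
          · simp only [firstIdx, hft]
    rcases hfi : firstIdx nums (pref nums (tN + 1) - k) tN with _ | p
    · -- no earlier prefix equals pref (tN+1) - k: ans unchanged
      have hstep : bStep k (d, s, ans) ((tN : Int), x)
          = (if d.contains (pref nums (tN + 1)) then d else d.insert (pref nums (tN + 1)) (tN : Int),
             pref nums (tN + 1), ans) := by
        simp only [bStep]
        rw [hsx, hd, hfi]
        rfl
      have hB' : BoundEnd nums k (tN + 1) ans := by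
        intro p' q hpq hq hk
        rcases (by omega : q ≤ tN ∨ q = tN + 1) with hq' | hq'
        · exact hB p' q hpq hq' hk
        · subst hq'
          exfalso
          exact fi_none nums _ tN hfi p' (by omega) (by linarith)
      rw [hstep, hcast]
      exact ih (tN + 1) _ _ _ hxs rfl hd' h0 hA hB'
    · -- earliest index p with pref p = pref (tN+1) - k found
      obtain ⟨hple, hpv⟩ := fi_sound nums _ tN _ hfi
      have hstep : bStep k (d, s, ans) ((tN : Int), x)
          = (if d.contains (pref nums (tN + 1)) then d else d.insert (pref nums (tN + 1)) (tN : Int),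
             pref nums (tN + 1), max ans ((tN : Int) - ((p : Int) - 1))) := by
        simp only [bStep]
        rw [hsx, hd, hfi]
        rfl
      have h0' : 0 ≤ max ans ((tN : Int) - ((p : Int) - 1)) := le_trans h0 (le_max_left _ _)
      have hA' : Attained nums k (max ans ((tN : Int) - ((p : Int) - 1))) := by
        rcases max_choice ans ((tN : Int) - ((p : Int) - 1)) with hmc | hmc
        · rw [hmc]; exact hA
        · rw [hmc]
          right
          refine ⟨p, tN + 1, by omega, by omega, by linarith, by push_cast; ring⟩
      have hB' : BoundEnd nums k (tN + 1) (max ans ((tN : Int) - ((p : Int) - 1))) := by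
        intro p' q hpq hq hk
        rcases (by omega : q ≤ tN ∨ q = tN + 1) with hq' | hq'
        · exact le_trans (hB p' q hpq hq' hk) (le_max_left _ _)
        · subst hq'
          have hmin : p ≤ p' := fi_min nums _ tN _ hfi p' (by omega) (by linarith)
          refine le_trans ?_ (le_max_right ans _)
          push_cast
          omega
      rw [hstep, hcast]
      exact ih (tN + 1) _ _ _ hxs rfl hd' h0' hA' hB'

lemma b_spec (nums : List Int) (k : Int) :
    0 ≤ maxSubArrayLen_old_alt nums k ∧ Attained nums k (maxSubArrayLen_old_alt nums k) ∧
      BoundEnd nums k nums.length (maxSubArrayLen_old_alt nums k) := by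
  have hd0 : ∀ v : Int, (PySem.Dict.ofList [((0 : Int), (-1 : Int))]).get? v
      = (firstIdx nums v 0).map (fun p => (p : Int) - 1) := by
    intro v
    have hl : (PySem.Dict.ofList [((0 : Int), (-1 : Int))]).get? v
        = if (0 : Int) = v then some (-1) else none := by
      simp [PySem.Dict.ofList, PySem.Dict.get?, PySem.Dict.update, PySem.Dict.insert,
        PySem.Dict.empty]
    rw [hl]
    simp only [firstIdx, pref_zero]
    by_cases hv : (0 : Int) = v
    · rw [if_pos hv, if_pos hv]; rfl
    · rw [if_neg hv, if_neg hv]; rfl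
  have h := b_loop nums k nums 0 (PySem.Dict.ofList [((0 : Int), (-1 : Int))]) 0 0 rfl rfl hd0
    (le_refl 0) (Or.inl rfl) (fun p q hpq hq hk => by omega)
  simpa [maxSubArrayLen_old_alt] using h

lemma best_unique (nums : List Int) (k a b : Int)
    (ha0 : 0 ≤ a) (haA : Attained nums k a) (haB : BoundStart nums k nums.length a)
    (hb0 : 0 ≤ b) (hbA : Attained nums k b) (hbB : BoundEnd nums k nums.length b) :
    a = b := by
  have hab : a ≤ b := by
    rcases haA with he | ⟨p, q, hpq, hq, hk, he⟩
    · rw [he]; exact hb0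
    · rw [he]; exact hbB p q hpq hq hk
  have hba : b ≤ a := by
    rcases hbA with he | ⟨p, q, hpq, hq, hk, he⟩
    · rw [he]; exact ha0
    · rw [he]; exact haB p q (by omega) hpq hq hk
  linarith

theorem maxSubArrayLen_old_spec : Claim_equal_maxSubArrayLen_old := by
  intro nums k _
  show maxSubArrayLen_old nums k = maxSubArrayLen_old_alt nums k
  rw [a_eq_aRef]
  obtain ⟨a0, aA, aB⟩ := aRef_spec nums k nums 0 0 rfl (le_refl 0) (Or.inl rfl)
    (fun p q hp _ _ _ => by omega)
  obtain ⟨b0, bA, bB⟩ := b_spec nums k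
  exact best_unique nums k _ _ a0 aA aB b0 bA bB
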